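-- pv_equiv track=rewrite | github.com/uitrbn/OVER-NAV-IVLN | finetune_src/r2r/eval_utils.py | alignments_from_paths
-- ===== SOURCE A (Python) =====
-- def extract_ep_order(path):
--     eps = [p["episode_id"] for p in path]
--     eps_single = []
--     for i in range(1, len(eps)):
--         if eps[i-1] != eps[i]:
--             eps_single.append(eps[i-1])
--     eps_single.append(eps[-1])
--     return eps_single
--
-- def alignments_from_paths(agent_path, gt_path):
--     assert extract_ep_order(gt_path) == extract_ep_order(agent_path), (
--         "agent and GT episode orders do not match."
--     )
--
--     alen = len(agent_path)
--     gtlen = len(gt_path)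
--
--     agent_alignment_points = []
--     for i in range(1, alen):
--         if agent_path[i]["episode_id"] != agent_path[i - 1]["episode_id"]:
--             agent_alignment_points.append(i - 1)  # stopping point
--             agent_alignment_points.append(i)  # starting point
--
--     gt_alignment_points = []
--     for i in range(1, gtlen):
--         if gt_path[i]["episode_id"] != gt_path[i - 1]["episode_id"]:
--             gt_alignment_points.append(i - 1)  # stopping point
--             gt_alignment_points.append(i)  # starting point
--
--     assert len(agent_alignment_points) == len(gt_alignment_points), (
--         "mismatch in number of alignment points."
--     )
--     return list(zip(agent_alignment_points, gt_alignment_points))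
-- ===== SOURCE B (Python) =====
-- def _runs(keys):
--     # consecutive runs of equal episode ids: [(key, run_length), ...]
--     runs = []
--     for k in keys:
--         if runs and runs[-1][0] == k:
--             runs[-1] = (k, runs[-1][1] + 1)
--         else:
--             runs.append((k, 1))
--     return runs
--
-- def alignments_from_paths(agent_path, gt_path):
--     ar = _runs([p["episode_id"] for p in agent_path])
--     gr = _runs([p["episode_id"] for p in gt_path])
--     assert [k for k, _ in gr] == [k for k, _ in ar], (
--         "agent and GT episode orders do not match."
--     )
--     pairs = []
--     a_end = 0
--     g_end = 0
--     for (_, al), (_, gl) in zip(ar[:-1], gr[:-1]):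
--         a_end += al
--         g_end += gl
--         pairs.append((a_end - 1, g_end - 1))
--         pairs.append((a_end, g_end))
--     return pairs
-- ===== Notes on version B (the rewrite author's own statement) =====
-- stated objective: alternative
-- what changed: B compresses each path once into runs of equal episode_id (key, length) and derives the alignment pairs directly from cumulative run lengths, instead of A's three separate pairwise-neighbour index scans plus a final zip; the second assert disappears because equal run-key sequences already force equally many boundaries.
import Mathlib
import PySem

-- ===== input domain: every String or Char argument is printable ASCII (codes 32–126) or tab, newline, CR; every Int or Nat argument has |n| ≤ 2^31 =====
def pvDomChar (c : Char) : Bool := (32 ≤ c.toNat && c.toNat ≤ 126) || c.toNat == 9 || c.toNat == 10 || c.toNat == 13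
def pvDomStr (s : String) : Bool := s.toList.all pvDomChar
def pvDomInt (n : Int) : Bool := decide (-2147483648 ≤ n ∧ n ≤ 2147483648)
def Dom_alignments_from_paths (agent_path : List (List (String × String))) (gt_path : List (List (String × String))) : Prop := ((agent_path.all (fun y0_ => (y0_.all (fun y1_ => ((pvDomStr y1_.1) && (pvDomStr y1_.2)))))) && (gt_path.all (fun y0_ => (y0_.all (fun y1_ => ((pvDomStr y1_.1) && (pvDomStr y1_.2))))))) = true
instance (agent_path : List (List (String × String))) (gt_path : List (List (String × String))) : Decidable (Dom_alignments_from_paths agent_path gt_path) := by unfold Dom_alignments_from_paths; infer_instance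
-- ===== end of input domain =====

-- B replaces A's three pairwise-neighbour index scans by a single run-length compression of each
-- path, deriving the alignment pairs from cumulative run lengths (objective: alternative).
-- The asserts / IndexError / KeyError of the Pythons are raise-points: Pre_ excludes exactly them.

-- ===== PORT A =====
-- p["episode_id"]; KeyError (get? = none) is excluded by Pre_, so getD "" is exact there
def pvEpA (p : List (String × String)) : String := (PySem.Dict.mk p).getD "episode_id" ""

def pvExtractEpOrder (path : List (List (String × String))) : List String :=
  let eps := path.map pvEpA
  let epsSingle := (PySem.List.pyRange 1 (eps.length : Int) 1).foldl
    (fun acc i =>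
      if PySem.List.pyGetD eps (i - 1) "" ≠ PySem.List.pyGetD eps i "" then
        acc ++ [PySem.List.pyGetD eps (i - 1) ""]
      else acc) []
  -- eps[-1]: IndexError on an empty path is excluded by Pre_
  epsSingle ++ [PySem.List.pyGetD eps (-1) ""]

def alignments_from_paths (agent_path : List (List (String × String))) (gt_path : List (List (String × String))) : List (Int × Int) :=
  -- assert: raises outside Pre_
  let _a1 := pvExtractEpOrder gt_path == pvExtractEpOrder agent_path
  let alen : Int := agent_path.length
  let gtlen : Int := gt_path.length
  let agentPts := (PySem.List.pyRange 1 alen 1).foldl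
    (fun acc i =>
      if pvEpA (PySem.List.pyGetD agent_path i []) ≠ pvEpA (PySem.List.pyGetD agent_path (i - 1) []) then
        acc ++ [i - 1] ++ [i]
      else acc) []
  let gtPts := (PySem.List.pyRange 1 gtlen 1).foldl
    (fun acc i =>
      if pvEpA (PySem.List.pyGetD gt_path i []) ≠ pvEpA (PySem.List.pyGetD gt_path (i - 1) []) then
        acc ++ [i - 1] ++ [i]
      else acc) []
  -- assert: raises outside Pre_
  let _a2 := agentPts.length == gtPts.length
  List.zip agentPts gtPts

-- ===== PORT B =====
-- _runs: one pass, extending the last run or starting a new one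
def pvRunsB (keys : List String) : List (String × Int) :=
  keys.foldl
    (fun rs k =>
      match rs.getLast? with
      | some last => if last.1 == k then rs.dropLast ++ [(k, last.2 + 1)] else rs ++ [(k, 1)]
      | none => rs ++ [(k, 1)])
    []

def alignments_from_paths_alt (agent_path : List (List (String × String))) (gt_path : List (List (String × String))) : List (Int × Int) :=
  let ar := pvRunsB (agent_path.map (fun p => (PySem.Dict.mk p).getD "episode_id" ""))
  let gr := pvRunsB (gt_path.map (fun p => (PySem.Dict.mk p).getD "episode_id" ""))
  -- assert: raises outside Pre_
  let _a1 := gr.map Prod.fst == ar.map Prod.fst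
  let st := (List.zip ar.dropLast gr.dropLast).foldl
    (fun (st : Int × Int × List (Int × Int)) rg =>
      let aEnd := st.1 + rg.1.2
      let gEnd := st.2.1 + rg.2.2
      (aEnd, gEnd, st.2.2 ++ [(aEnd - 1, gEnd - 1)] ++ [(aEnd, gEnd)]))
    (0, 0, [])
  st.2.2

-- ===== PRECONDITION & SPEC =====
-- adjacent-duplicate compression of the episode-id sequence (used only to STATE the assert's condition)
def pvDedupAdj : List String → List String
  | [] => []
  | [x] => [x]
  | x :: y :: t => if x == y then pvDedupAdj (y :: t) else x :: pvDedupAdj (y :: t)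

-- Pre_ excludes exactly the raise-points of A: empty paths (IndexError in extract_ep_order),
-- a dict without the "episode_id" key (KeyError), and mismatched episode orders (AssertionError).
def Pre_alignments_from_paths (agent_path : List (List (String × String))) (gt_path : List (List (String × String))) : Prop :=
  agent_path ≠ [] ∧ gt_path ≠ [] ∧
  agent_path.all (fun p => ((PySem.Dict.mk p).get? "episode_id").isSome) = true ∧
  gt_path.all (fun p => ((PySem.Dict.mk p).get? "episode_id").isSome) = true ∧
  pvDedupAdj (gt_path.map (fun p => (PySem.Dict.mk p).getD "episode_id" "")) =
    pvDedupAdj (agent_path.map (fun p => (PySem.Dict.mk p).getD "episode_id" ""))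
instance (agent_path : List (List (String × String))) (gt_path : List (List (String × String))) : Decidable (Pre_alignments_from_paths agent_path gt_path) := by unfold Pre_alignments_from_paths; infer_instance

def pvWitness_alignments_from_paths : (List (List (String × String))) × (List (List (String × String))) :=
  ([[("episode_id", "a")], [("episode_id", "b")]], [[("episode_id", "a")], [("episode_id", "a")], [("episode_id", "b")]])

def Spec_alignments_from_paths (agent_path : List (List (String × String))) (gt_path : List (List (String × String))) (out : List (Int × Int)) : Prop := out = alignments_from_paths_alt agent_path gt_path
instance (agent_path : List (List (String × String))) (gt_path : List (List (String × String))) (out : List (Int × Int)) : Decidable (Spec_alignments_from_paths agent_path gt_path out) := by unfold Spec_alignments_from_paths; infer_instance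

-- ===== CLAIM (what is proved, stated in full; the proofs are below) =====
def Claim_equal_alignments_from_paths : Prop := ∀ (agent_path : List (List (String × String))) (gt_path : List (List (String × String))), Dom_alignments_from_paths agent_path gt_path → Pre_alignments_from_paths agent_path gt_path → Spec_alignments_from_paths agent_path gt_path (alignments_from_paths agent_path gt_path)

-- ===== LEMMAS AND PROOFS =====

-- runs of equal keys, specified by takeWhile/dropWhile (proof-only characterisation of pvRunsB)
def pvRunsW : List String → List (String × Int)
  | [] => []
  | k :: ks =>
      (k, ((ks.takeWhile (fun x => x == k)).length : Int) + 1) ::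
        pvRunsW (ks.dropWhile (fun x => x == k))
  termination_by ks => ks.length
  decreasing_by
    have := List.length_dropWhile_le (fun x => x == k) ks
    simp only [List.length_cons]; omega

theorem pv_runsB_fold :
    ∀ (ks : List String) (rs : List (String × Int)) (k : String) (n : Int),
      ks.foldl
        (fun rs k =>
          match rs.getLast? with
          | some last => if last.1 == k then rs.dropLast ++ [(k, last.2 + 1)] else rs ++ [(k, 1)]
          | none => rs ++ [(k, 1)])
        (rs ++ [(k, n)]) =
      rs ++ [(k, n + ((ks.takeWhile (fun x => x == k)).length : Int))] ++
        pvRunsW (ks.dropWhile (fun x => x == k)) := by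
  intro ks
  induction ks with
  | nil => intro rs k n; simp [pvRunsW]
  | cons x t ih =>
    intro rs k n
    simp only [List.foldl_cons, List.getLast?_concat, List.dropLast_concat]
    by_cases h : k = x
    · subst h
      rw [if_pos (by simp)]
      rw [ih rs k (n + 1)]
      simp only [List.takeWhile_cons, List.dropWhile_cons, beq_self_eq_true, if_pos,
        List.length_cons]
      have : n + 1 + ((t.takeWhile (fun x => x == k)).length : Int) =
          n + (((t.takeWhile (fun x => x == k)).length : Nat) + 1 : Nat) := by push_cast; ring
      rw [this]
    · rw [if_neg (by simpa using h)]
      rw [ih (rs ++ [(k, n)]) x 1]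
      have hx : (x == k) = false := by simpa using fun e => h e.symm
      simp only [List.takeWhile_cons, List.dropWhile_cons, hx, Bool.false_eq_true,
        List.length_nil, Nat.cast_zero, add_zero, ite_false]
      simp only [pvRunsW, List.append_assoc, List.cons_append, List.nil_append]
      have : (1 : Int) + ((t.takeWhile (fun y => y == x)).length : Int) =
          ((t.takeWhile (fun y => y == x)).length : Int) + 1 := by ring
      rw [this]

theorem pv_runsB_eq_runsW : ∀ (ks : List String), pvRunsB ks = pvRunsW ks := by
  intro ks
  cases ks with
  | nil => simp [pvRunsB, pvRunsW]
  | cons k t =>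
    show t.foldl _ ([] ++ [(k, 1)]) = _
    rw [pv_runsB_fold t [] k 1]
    simp only [pvRunsW, List.nil_append]
    have : (1 : Int) + ((t.takeWhile (fun x => x == k)).length : Int) =
        ((t.takeWhile (fun x => x == k)).length : Int) + 1 := by ring
    rw [this]
    simp

theorem pv_dedup_cons (k : String) :
    ∀ (t : List String), pvDedupAdj (k :: t) = k :: pvDedupAdj (t.dropWhile (fun x => x == k)) := by
  intro t
  induction t with
  | nil => rfl
  | cons y t' ih =>
    by_cases h : y = k
    · subst h
      simpa [pvDedupAdj, List.dropWhile_cons] using ih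
    · have h1 : (k == y) = false := by simpa using fun e => h e.symm
      have h2 : (y == k) = false := by simpa using h
      simp [pvDedupAdj, h1, h2]

theorem pv_dedup_eq_runsW_fst :
    ∀ (n : Nat) (ks : List String), ks.length ≤ n →
      pvDedupAdj ks = (pvRunsW ks).map Prod.fst := by
  intro n
  induction n with
  | zero =>
    intro ks h
    cases ks with
    | nil => simp [pvDedupAdj, pvRunsW]
    | cons k t => simp at h
  | succ n ih =>
    intro ks h
    cases ks with
    | nil => simp [pvDedupAdj, pvRunsW]
    | cons k t =>
      rw [pv_dedup_cons]
      simp only [pvRunsW, List.map_cons]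
      congr 1
      exact ih _ (le_trans (List.length_dropWhile_le _ t) (by simpa using Nat.lt_succ_iff.mp (Nat.lt_succ_of_le (by simpa using h))))

-- boundary indices of a key list, the head sitting at absolute index s
def pvBnds (s : Int) : List String → List Int
  | [] => []
  | [_] => []
  | a :: b :: t => (if a ≠ b then [s + 1] else []) ++ pvBnds (s + 1) (b :: t)

-- running partial sums starting from c
def pvSums (c : Int) : List Int → List Int
  | [] => []
  | x :: xs => (c + x) :: pvSums (c + x) xs

-- B's pair builder, recursively
def pvBPairs (ca cg : Int) : List ((String × Int) × (String × Int)) → List (Int × Int)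
  | [] => []
  | rg :: t => (ca + rg.1.2 - 1, cg + rg.2.2 - 1) :: (ca + rg.1.2, cg + rg.2.2) ::
      pvBPairs (ca + rg.1.2) (cg + rg.2.2) t

theorem pv_foldl_append_two {α β : Type} (p : α → Prop) [DecidablePred p] (f g : α → β) :
    ∀ (l : List α) (acc : List β),
      l.foldl (fun acc x => if p x then acc ++ [f x] ++ [g x] else acc) acc =
        acc ++ (l.filter (fun x => decide (p x))).flatMap (fun x => [f x, g x]) := by
  intro l
  induction l with
  | nil => intro acc; simp
  | cons x t ih =>
    intro acc
    simp only [List.foldl_cons, List.filter_cons]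
    by_cases h : p x
    · rw [if_pos h, ih]
      simp [h, List.append_assoc]
    · rw [if_neg h, ih]
      simp [h]

theorem pv_bridge_aux (ks : List String) :
    ∀ (m j : Nat), ks.length ≤ j + m →
      (PySem.List.pyRange ((j : Int) + 1) (ks.length : Int) 1).filter
          (fun i => decide (PySem.List.pyGetD ks (i - 1) "" ≠ PySem.List.pyGetD ks i "")) =
        pvBnds (j : Int) (ks.drop j) := by
  intro m
  induction m with
  | zero =>
    intro j h
    rw [PySem.List.pyRange_one_eq_nil (by exact_mod_cast Nat.le_succ_of_le (by simpa using h))]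
    rw [List.drop_eq_nil_of_le (by simpa using h)]
    rfl
  | succ m ih =>
    intro j h
    by_cases hj : j + 1 < ks.length
    · rw [PySem.List.pyRange_one_cons (by exact_mod_cast hj)]
      rw [List.filter_cons]
      have hjlt : j < ks.length := by omega
      have e0 : ((j : Int) + 1 - 1) = ((j : Nat) : Int) := by ring
      have e1 : ((j : Int) + 1) = (((j + 1 : Nat)) : Int) := by push_cast; ring
      have e2 : ((j : Int) + 1 + 1) = (((j + 1 : Nat)) : Int) + 1 := by push_cast; ring
      have g0 : PySem.List.pyGetD ks ((j : Int) + 1 - 1) "" = ks[j] := by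
        rw [e0, PySem.List.pyGetD_natCast, List.getD_eq_getElem _ _ hjlt]
      have g1 : PySem.List.pyGetD ks ((j : Int) + 1) "" = ks[j + 1] := by
        rw [e1, PySem.List.pyGetD_natCast, List.getD_eq_getElem _ _ hj]
      rw [e2, ih (j + 1) (by omega)]
      rw [← List.getElem_cons_drop hjlt, ← List.getElem_cons_drop hj]
      rw [pvBnds, List.getElem_cons_drop hj]
      have hg : ks[j]? = some ks[j] := List.getElem?_eq_getElem hjlt
      by_cases hne : ks[j] = ks[j + 1]
      · simp [g1, hne, hg, Nat.cast_add, Nat.cast_one]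
      · simp [g1, hne, hg, Nat.cast_add, Nat.cast_one]
    · rw [PySem.List.pyRange_one_eq_nil (by exact_mod_cast (by omega : ks.length ≤ j + 1))]
      have hlen : ks.length ≤ j + 1 := by omega
      cases hd : ks.drop j with
      | nil => rfl
      | cons a l =>
        cases l with
        | nil => rfl
        | cons b l2 =>
          exfalso
          have := congrArg List.length hd
          simp [List.length_drop] at this
          omega

theorem pv_bridge (ks : List String) :
    (PySem.List.pyRange 1 (ks.length : Int) 1).filter
        (fun i => decide (PySem.List.pyGetD ks (i - 1) "" ≠ PySem.List.pyGetD ks i "")) =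
      pvBnds 0 ks := by
  have := pv_bridge_aux ks ks.length 0 (by omega)
  simpa using this

theorem pv_bnds_run (k : String) :
    ∀ (pre : List String) (rest : List String) (s : Int), (∀ x ∈ pre, x = k) →
      pvBnds s (k :: (pre ++ rest)) = pvBnds (s + pre.length) (k :: rest) := by
  intro pre
  induction pre with
  | nil => intro rest s _; simp
  | cons p ps ih =>
    intro rest s h
    have hp : p = k := h p (by simp)
    subst hp
    show (if p ≠ p then [s + 1] else []) ++ pvBnds (s + 1) (p :: (ps ++ rest)) =
      pvBnds (s + ((p :: ps).length : Int)) (p :: rest)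
    rw [if_neg (by simp), ih rest (s + 1) (fun x hx => h x (by simp [hx])), List.nil_append]
    congr 1
    simp only [List.length_cons]
    push_cast
    ring

theorem pv_dropWhile_head_false (p : String → Bool) :
    ∀ (l t : List String) (x : String), l.dropWhile p = x :: t → p x = false := by
  intro l
  induction l with
  | nil => intro t x h; simp at h
  | cons a l ih =>
    intro t x h
    rw [List.dropWhile_cons] at h
    split at h
    · exact ih t x h
    · cases h; simp_all

theorem pv_bnds_eq_sums :
    ∀ (n : Nat) (ks : List String), ks.length ≤ n → ks ≠ [] → ∀ (c : Int),
      pvBnds c ks = pvSums c (((pvRunsW ks).dropLast).map (fun r => r.2)) := by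
  intro n
  induction n with
  | zero =>
    intro ks h hne
    cases ks with
    | nil => exact absurd rfl hne
    | cons k t => simp at h
  | succ n ih =>
    intro ks h hne c
    cases ks with
    | nil => exact absurd rfl hne
    | cons k t =>
      have hsplit := List.takeWhile_append_dropWhile (p := fun x => x == k) (l := t)
      have hpre : ∀ x ∈ t.takeWhile (fun x => x == k), x = k := fun x hx => by
        simpa using List.mem_takeWhile_imp hx
      cases hrest : t.dropWhile (fun x => x == k) with
      | nil =>
        conv_lhs => rw [← hsplit, hrest]
        rw [pv_bnds_run k _ [] c hpre]
        simp only [pvRunsW, hrest]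
        simp [pvBnds, pvSums]
      | cons r tt =>
        have hr : (r == k) = false := pv_dropWhile_head_false _ t tt r hrest
        have hkr : k ≠ r := by intro e; subst e; simp at hr
        conv_lhs => rw [← hsplit, hrest]
        rw [pv_bnds_run k _ (r :: tt) c hpre]
        rw [pvBnds, if_pos hkr]
        have hlen : (r :: tt).length ≤ n := by
          have h1 := List.length_dropWhile_le (fun x => x == k) t
          rw [hrest] at h1
          simp only [List.length_cons] at h h1 ⊢
          omega
        rw [ih (r :: tt) hlen (by simp) (c + (t.takeWhile (fun x => x == k)).length + 1)]
        simp only [pvRunsW, hrest]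
        simp only [List.dropLast_cons₂, List.map_cons, pvSums]
        have e : c + ((t.takeWhile (fun x => x == k)).length : Int) + 1 =
            c + (((t.takeWhile (fun x => x == k)).length : Int) + 1) := by ring
        rw [e]
        simp

theorem pv_zip_flatMap :
    ∀ (xs ys : List Int), xs.length = ys.length →
      List.zip (xs.flatMap fun a => [a - 1, a]) (ys.flatMap fun b => [b - 1, b]) =
        (List.zip xs ys).flatMap (fun p => [(p.1 - 1, p.2 - 1), (p.1, p.2)]) := by
  intro xs
  induction xs with
  | nil =>
    intro ys h
    have : ys = [] := by cases ys with | nil => rfl | cons a t => simp at h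
    subst this
    rfl
  | cons x xs ih =>
    intro ys h
    cases ys with
    | nil => simp at h
    | cons y ys =>
      simp only [List.flatMap_cons, List.cons_append, List.nil_append, List.zip_cons_cons]
      rw [ih ys (by simpa using h)]

theorem pv_bfold (zs : List ((String × Int) × (String × Int))) :
    ∀ (ca cg : Int) (acc : List (Int × Int)),
      (zs.foldl
        (fun (st : Int × Int × List (Int × Int)) rg =>
          let aEnd := st.1 + rg.1.2
          let gEnd := st.2.1 + rg.2.2
          (aEnd, gEnd, st.2.2 ++ [(aEnd - 1, gEnd - 1)] ++ [(aEnd, gEnd)]))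
        (ca, cg, acc)).2.2 = acc ++ pvBPairs ca cg zs := by
  induction zs with
  | nil => intro ca cg acc; simp [pvBPairs]
  | cons rg t ih =>
    intro ca cg acc
    simp only [List.foldl_cons]
    rw [ih]
    simp [pvBPairs, List.append_assoc]

theorem pv_bpairs_eq (zs : List ((String × Int) × (String × Int))) :
    ∀ (ca cg : Int),
      pvBPairs ca cg zs =
        (List.zip (pvSums ca (zs.map (fun r => r.1.2))) (pvSums cg (zs.map (fun r => r.2.2)))).flatMap
          (fun p => [(p.1 - 1, p.2 - 1), (p.1, p.2)]) := by
  induction zs with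
  | nil => intro ca cg; rfl
  | cons rg t ih =>
    intro ca cg
    simp only [List.map_cons, pvSums, List.zip_cons_cons, List.flatMap_cons, pvBPairs]
    rw [ih]
    rfl

theorem pv_len_sums : ∀ (l : List Int) (c : Int), (pvSums c l).length = l.length := by
  intro l
  induction l with
  | nil => intro c; rfl
  | cons x xs ih => intro c; simp [pvSums, ih]

theorem pv_ptsA (path : List (List (String × String))) (hne : path ≠ []) :
    (PySem.List.pyRange 1 ((path.length : Int)) 1).foldl
        (fun acc i =>
          if pvEpA (PySem.List.pyGetD path i []) ≠ pvEpA (PySem.List.pyGetD path (i - 1) []) then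
            acc ++ [i - 1] ++ [i]
          else acc) [] =
      (pvSums 0 (((pvRunsW (path.map pvEpA)).dropLast).map (fun r => r.2))).flatMap
        (fun i => [i - 1, i]) := by
  rw [pv_foldl_append_two
    (fun i => pvEpA (PySem.List.pyGetD path i []) ≠ pvEpA (PySem.List.pyGetD path (i - 1) []))
    (fun i => i - 1) (fun i => i) _ []]
  rw [List.nil_append]
  have hflt : (PySem.List.pyRange 1 ((path.length : Int)) 1).filter
      (fun i => decide (pvEpA (PySem.List.pyGetD path i []) ≠ pvEpA (PySem.List.pyGetD path (i - 1) []))) =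
      (PySem.List.pyRange 1 (((path.map pvEpA).length : Int)) 1).filter
        (fun i => decide (PySem.List.pyGetD (path.map pvEpA) (i - 1) "" ≠ PySem.List.pyGetD (path.map pvEpA) i "")) := by
    rw [List.length_map]
    apply List.filter_congr
    intro i _
    have e1 : PySem.List.pyGetD (path.map pvEpA) i "" = pvEpA (PySem.List.pyGetD path i []) := by
      rw [show ("" : String) = pvEpA [] from rfl]
      exact PySem.List.pyGetD_map pvEpA path i []
    have e2 : PySem.List.pyGetD (path.map pvEpA) (i - 1) "" = pvEpA (PySem.List.pyGetD path (i - 1) []) := by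
      rw [show ("" : String) = pvEpA [] from rfl]
      exact PySem.List.pyGetD_map pvEpA path (i - 1) []
    rw [e1, e2]
    exact decide_eq_decide.mpr ne_comm
  rw [hflt, pv_bridge, pv_bnds_eq_sums (path.map pvEpA).length _ le_rfl (by simpa using hne) 0]

-- ===== VERDICT (by name: the statement is the Claim_ definition above) =====
theorem alignments_from_paths_spec : Claim_equal_alignments_from_paths := by
  intro a g _ hpre
  obtain ⟨ha, hg, _, _, hdd⟩ := hpre
  unfold Spec_alignments_from_paths
  have hfun : (fun p : List (String × String) => (PySem.Dict.mk p).getD "episode_id" "") = pvEpA := rfl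
  rw [hfun] at hdd
  have hmap : (pvRunsW (g.map pvEpA)).map Prod.fst = (pvRunsW (a.map pvEpA)).map Prod.fst := by
    rw [← pv_dedup_eq_runsW_fst (g.map pvEpA).length _ le_rfl,
        ← pv_dedup_eq_runsW_fst (a.map pvEpA).length _ le_rfl]
    exact hdd
  have hrlen : (pvRunsW (a.map pvEpA)).length = (pvRunsW (g.map pvEpA)).length := by
    have := congrArg List.length hmap
    simpa using this.symm
  have hdlen : (pvRunsW (a.map pvEpA)).dropLast.length = (pvRunsW (g.map pvEpA)).dropLast.length := by
    simp [hrlen]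
  simp only [alignments_from_paths, alignments_from_paths_alt]
  rw [hfun, pv_runsB_eq_runsW, pv_runsB_eq_runsW]
  rw [pv_ptsA a ha, pv_ptsA g hg]
  have hslen : (pvSums 0 (((pvRunsW (a.map pvEpA)).dropLast).map (fun r => r.2))).length =
      (pvSums 0 (((pvRunsW (g.map pvEpA)).dropLast).map (fun r => r.2))).length := by
    rw [pv_len_sums, pv_len_sums]
    simp only [List.length_map, List.length_dropLast]
    omega
  rw [pv_zip_flatMap _ _ hslen]
  rw [pv_bfold, pv_bpairs_eq, List.nil_append]
  have m1 : (List.zip (pvRunsW (a.map pvEpA)).dropLast (pvRunsW (g.map pvEpA)).dropLast).map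
      (fun r => r.1.2) = (pvRunsW (a.map pvEpA)).dropLast.map (fun r => r.2) := by
    rw [show (fun (r : (String × Int) × (String × Int)) => r.1.2) =
        (fun x : String × Int => x.2) ∘ Prod.fst from rfl]
    rw [← List.map_map, List.map_fst_zip (le_of_eq hdlen)]
  have m2 : (List.zip (pvRunsW (a.map pvEpA)).dropLast (pvRunsW (g.map pvEpA)).dropLast).map
      (fun r => r.2.2) = (pvRunsW (g.map pvEpA)).dropLast.map (fun r => r.2) := by
    rw [show (fun (r : (String × Int) × (String × Int)) => r.2.2) =
        (fun x : String × Int => x.2) ∘ Prod.snd from rfl]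
    rw [← List.map_map, List.map_snd_zip (le_of_eq hdlen.symm)]
  rw [m1, m2]
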